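-- pv_equiv track=rewrite | github.com/toBetterMans/spider | gbicc/code_cyt/tyc0510/test/decode_int_test.py | gen_rsid
-- ===== SOURCE A (Python) =====
-- _0x4fec = [
--     'f9D1x1Z2o1U2f5A1a1P1i7R1u2S1m1F1',
--     'o2A1x2F1u5~j1Y2z3!p2~r3G2m8S1c1',
--     'i3E5o1~d2!y2H1e2F1b6`g4v7',
--     'p1`t7D3x5#w2~l2Z1v4Y1k4M1n1',
--     'C2e3P1r7!s6U2n2~p5X1e3#',
--     'g4`b6W1x4R1r4#!u5!#D1f2',
--     '!z4U1f4`f2R2o3!l4I1v6F1h2F1x2!',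
--     'b2~u9h2K1l3X2y9#B4t1',
--     't5H1s7D1o2#p2#z1Q3v2`j6',
--     'r1#u5#f1Z2w7!r7#j3S1']
--
-- ne = ['2633141825201321121345332721524273528936811101916293117022304236',
--       '1831735156281312241132340102520529171363214283321272634162219930',
--       '2332353860219720155312141629130102234183691124281413251227261733',
--       '2592811262018293062732141927100364232411333831161535317211222534',
--       '9715232833130331019112512913172124126035262343627321642220185148',
--       '3316362031032192529235212215274341412306269813312817111724201835',
--       '3293412148301016132183119242311021281920736172527353261533526224',
--       '3236623313013201625221912357142415851018341117262721294332103928',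
--       '2619332514511302724163415617234183291312001227928218353622321031',
--       '3111952725113022716818421512203433241091723133635282932601432216']
--
-- def gen_rsid(tid):
--     r = str(ord(tid[0]))
--     r = r[1] if len(r) > 1 else r
--     i = ne[int(r)]
--     u = 0
--     o = _0x4fec[int(r)]
--
--     a = []
--     s = 0
--     while u < len(o):
--         if not ("`" != o[u] and "!" != o[u] and "~" != o[u]  ):
--             a.append(i[s:(s + 1)])
--             s += 1
--
--         if "#" == o[u]:
--             a.append(i[s:(s + 1)])
--             a.append(i[(s + 1):(s + 3)])
--             a.append(i[(s + 3):(s + 4)])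
--             s += 4
--
--         if 96 < ord(o[u]) < 123:
--             l = int(o[u + 1])
--             c = 0
--             while c < l:
--                 a.append(i[s:(s + 2)])
--                 s += 2
--                 c += 1
--
--         if 64 < ord(o[u]) < 91:
--             l = int(o[u + 1])
--             c = 0
--             while c < l:
--                 a.append(i[s:(s + 1)])
--                 s += 1
--                 c += 1
--         u += 1
--     return a
-- ===== SOURCE B (Python) =====
-- _0x4fec = [
--     'f9D1x1Z2o1U2f5A1a1P1i7R1u2S1m1F1',
--     'o2A1x2F1u5~j1Y2z3!p2~r3G2m8S1c1',
--     'i3E5o1~d2!y2H1e2F1b6`g4v7',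
--     'p1`t7D3x5#w2~l2Z1v4Y1k4M1n1',
--     'C2e3P1r7!s6U2n2~p5X1e3#',
--     'g4`b6W1x4R1r4#!u5!#D1f2',
--     '!z4U1f4`f2R2o3!l4I1v6F1h2F1x2!',
--     'b2~u9h2K1l3X2y9#B4t1',
--     't5H1s7D1o2#p2#z1Q3v2`j6',
--     'r1#u5#f1Z2w7!r7#j3S1']
--
-- ne = ['2633141825201321121345332721524273528936811101916293117022304236',
--       '1831735156281312241132340102520529171363214283321272634162219930',
--       '2332353860219720155312141629130102234183691124281413251227261733',
--       '2592811262018293062732141927100364232411333831161535317211222534',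
--       '9715232833130331019112512913172124126035262343627321642220185148',
--       '3316362031032192529235212215274341412306269813312817111724201835',
--       '3293412148301016132183119242311021281920736172527353261533526224',
--       '3236623313013201625221912357142415851018341117262721294332103928',
--       '2619332514511302724163415617234183291312001227928218353622321031',
--       '3111952725113022716818421512203433241091723133635282932601432216']
--
--
-- def gen_rsid(tid):
--     # Two-pass decode: first derive a schedule of slice widths from the
--     # control string, then cut the digit string according to that schedule.
--     r = str(ord(tid[0]))
--     r = r[1] if len(r) > 1 else r
--     i = ne[int(r)]
--     o = _0x4fec[int(r)]
--
--     widths = []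
--     u = 0
--     while u < len(o):
--         ch = o[u]
--         if ch in '`!~':
--             widths.append(1)
--         elif ch == '#':
--             widths.extend((1, 2, 1))
--         elif 'a' <= ch <= 'z':
--             widths.extend([2] * int(o[u + 1]))
--         elif 'A' <= ch <= 'Z':
--             widths.extend([1] * int(o[u + 1]))
--         u += 1
--
--     a = []
--     s = 0
--     for w in widths:
--         a.append(i[s:s + w])
--         s += w
--     return a
-- ===== Notes on version B (the rewrite author's own statement) =====
-- stated objective: alternative
-- what changed: A slices the digit string inside one marker-driven scan with nested repeat loops and a running offset; B first compiles the control string into a flat schedule of slice widths, then cuts the digit string in a single second pass over that schedule.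
import Mathlib
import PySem

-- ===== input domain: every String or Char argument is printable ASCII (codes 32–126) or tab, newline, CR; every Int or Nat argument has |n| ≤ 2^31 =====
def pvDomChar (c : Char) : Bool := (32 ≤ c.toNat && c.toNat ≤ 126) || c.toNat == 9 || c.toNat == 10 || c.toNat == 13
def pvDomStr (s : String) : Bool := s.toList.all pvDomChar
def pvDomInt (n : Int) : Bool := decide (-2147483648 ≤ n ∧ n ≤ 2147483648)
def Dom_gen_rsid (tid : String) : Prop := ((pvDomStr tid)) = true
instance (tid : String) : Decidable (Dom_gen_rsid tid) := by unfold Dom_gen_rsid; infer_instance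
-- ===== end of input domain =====

-- B replaces A's single marker-driven loop that slices as it scans by a two-pass
-- decomposition: first build the schedule of slice widths, then cut the digit string
-- once along that schedule (objective: alternative decomposition, same cost).

-- ===== PORT A =====
def pv0x4fec : List String := [
  "f9D1x1Z2o1U2f5A1a1P1i7R1u2S1m1F1",
  "o2A1x2F1u5~j1Y2z3!p2~r3G2m8S1c1",
  "i3E5o1~d2!y2H1e2F1b6`g4v7",
  "p1`t7D3x5#w2~l2Z1v4Y1k4M1n1",
  "C2e3P1r7!s6U2n2~p5X1e3#",
  "g4`b6W1x4R1r4#!u5!#D1f2",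
  "!z4U1f4`f2R2o3!l4I1v6F1h2F1x2!",
  "b2~u9h2K1l3X2y9#B4t1",
  "t5H1s7D1o2#p2#z1Q3v2`j6",
  "r1#u5#f1Z2w7!r7#j3S1"]

def pvNe : List String := [
  "2633141825201321121345332721524273528936811101916293117022304236",
  "1831735156281312241132340102520529171363214283321272634162219930",
  "2332353860219720155312141629130102234183691124281413251227261733",
  "2592811262018293062732141927100364232411333831161535317211222534",
  "9715232833130331019112512913172124126035262343627321642220185148",
  "3316362031032192529235212215274341412306269813312817111724201835",
  "3293412148301016132183119242311021281920736172527353261533526224",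
  "3236623313013201625221912357142415851018341117262721294332103928",
  "2619332514511302724163415617234183291312001227928218353622321031",
  "3111952725113022716818421512203433241091723133635282932601432216"]

-- i[s:s+w]
def pvSliceA (i : String) (s w : Nat) : String :=
  PySem.Str.slice i (some (s : Int)) (some ((s + w : Nat) : Int))

-- 'while c < l: a.append(i[s:s+w]); s += w; c += 1'  (the two inner while loops of A)
def pvInnerA (i : String) (w : Nat) : Nat → Nat → List String → List String × Nat
  | 0, s, a => (a, s)
  | Nat.succ k, s, a => pvInnerA i w k (s + w) (a ++ [pvSliceA i s w])

-- the outer 'while u < len(o)' loop of A; o[u] is the head, o[u+1] the head of the rest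
def pvLoopA (i : String) : List Char → Nat → List String → List String
  | [], _, a => a
  | c :: rest, s, a =>
    let (a, s) :=
      if ¬('`' ≠ c ∧ '!' ≠ c ∧ '~' ≠ c) then (a ++ [pvSliceA i s 1], s + 1) else (a, s)
    let (a, s) :=
      if '#' = c then
        (a ++ [pvSliceA i s 1, pvSliceA i (s + 1) 2, pvSliceA i (s + 3) 1], s + 4)
      else (a, s)
    let (a, s) :=
      if 96 < c.toNat ∧ c.toNat < 123 then
        match PySem.List.pyGet? rest 0 with
        | none => (a, s)          -- Python raises IndexError here (unreachable)
        | some d =>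
          match PySem.Int.ofStr? (String.ofList [d]) with
          | none => (a, s)        -- Python raises ValueError here (unreachable)
          | some l => pvInnerA i 2 l.toNat s a
      else (a, s)
    let (a, s) :=
      if 64 < c.toNat ∧ c.toNat < 91 then
        match PySem.List.pyGet? rest 0 with
        | none => (a, s)
        | some d =>
          match PySem.Int.ofStr? (String.ofList [d]) with
          | none => (a, s)
          | some l => pvInnerA i 1 l.toNat s a
      else (a, s)
    pvLoopA i rest s a

-- r = str(ord(tid[0])); r = r[1] if len(r) > 1 else r
def pvRA (n : Nat) : String :=
  let r := PySem.Int.toStr (n : Int)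
  if 1 < PySem.Str.len r then
    (match PySem.Str.pyGet? r 1 with
     | some ch => String.ofList [ch]
     | none => r)                          -- unreachable (guarded by the length test)
  else r

-- i = ne[int(r)]; o = _0x4fec[int(r)]; then A's scan loop
def pvTailA (k : Int) : List String :=
  match PySem.List.pyGet? pvNe k with
  | none => []                             -- Python raises IndexError here (unreachable)
  | some i =>
    match PySem.List.pyGet? pv0x4fec k with
    | none => []
    | some o => pvLoopA i o.toList 0 []

-- everything after ord(tid[0]), as a function of that code point
def pvBodyA (n : Nat) : List String :=
  match PySem.Int.ofStr? (pvRA n) with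
  | none => []                             -- Python raises ValueError here (unreachable)
  | some k => pvTailA k

def gen_rsid (tid : String) : List String :=
  match PySem.Str.pyGet? tid 0 with
  | none => []                             -- Python raises IndexError: excluded by Pre_
  | some c => pvBodyA c.toNat

-- ===== PORT B =====
-- pass 1 of Source B: the schedule of slice widths read off the control string
def pvWidthsB : List Char → List Nat
  | [] => []
  | c :: rest =>
    (if c = '`' ∨ c = '!' ∨ c = '~' then [1]
     else if c = '#' then [1, 2, 1]
     else if 'a' ≤ c ∧ c ≤ 'z' then
       match PySem.List.pyGet? rest 0 with
       | none => []                        -- Python raises IndexError here (unreachable)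
       | some d =>
         match PySem.Int.ofStr? (String.ofList [d]) with
         | none => []                      -- Python raises ValueError here (unreachable)
         | some l => List.replicate l.toNat 2
     else if 'A' ≤ c ∧ c ≤ 'Z' then
       match PySem.List.pyGet? rest 0 with
       | none => []
       | some d =>
         match PySem.Int.ofStr? (String.ofList [d]) with
         | none => []
         | some l => List.replicate l.toNat 1
     else []) ++ pvWidthsB rest

-- pass 2 of Source B: cut the digit string along the width schedule
def pvCutB (i : String) : List Nat → Nat → List String
  | [], _ => []
  | w :: ws, s =>
    PySem.Str.slice i (some (s : Int)) (some ((s + w : Nat) : Int)) :: pvCutB i ws (s + w)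

def pvRB (n : Nat) : String :=
  let r := PySem.Int.toStr (n : Int)
  if 1 < PySem.Str.len r then
    (match PySem.Str.pyGet? r 1 with
     | some ch => String.ofList [ch]
     | none => r)
  else r

def pvTailB (k : Int) : List String :=
  match PySem.List.pyGet? pvNe k with
  | none => []
  | some i =>
    match PySem.List.pyGet? pv0x4fec k with
    | none => []
    | some o => pvCutB i (pvWidthsB o.toList) 0

def pvBodyB (n : Nat) : List String :=
  match PySem.Int.ofStr? (pvRB n) with
  | none => []
  | some k => pvTailB k

def gen_rsid_alt (tid : String) : List String :=
  match PySem.Str.pyGet? tid 0 with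
  | none => []
  | some c => pvBodyB c.toNat

-- ===== PRECONDITION & SPEC =====
-- A evaluates tid[0]: on the empty string it raises IndexError, so Pre_ excludes it.
def Pre_gen_rsid (tid : String) : Prop := tid ≠ ""
instance (tid : String) : Decidable (Pre_gen_rsid tid) := by unfold Pre_gen_rsid; infer_instance
def pvWitness_gen_rsid : String := "a"

def Spec_gen_rsid (tid : String) (out : List String) : Prop := out = gen_rsid_alt tid
instance (tid : String) (out : List String) : Decidable (Spec_gen_rsid tid out) := by unfold Spec_gen_rsid; infer_instance

-- ===== CLAIM (what is proved, stated in full; the proofs are below) =====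
def Claim_equal_gen_rsid : Prop := ∀ (tid : String), Dom_gen_rsid tid → Pre_gen_rsid tid → Spec_gen_rsid tid (gen_rsid tid)

-- ===== LEMMAS AND PROOFS =====
theorem pvR_eq (n : Nat) : pvRB n = pvRA n := rfl

-- the digit pipeline lands in [0, 10) on every admitted code point (cheap: no decoding)
set_option maxHeartbeats 2000000 in
set_option maxRecDepth 100000 in
theorem pvDigit_bound :
    ∀ n : Nat, n < 127 →
      ((match PySem.Int.ofStr? (pvRA n) with
        | none => true
        | some k => decide (0 ≤ k ∧ k < 10)) = true) := by decide

-- the two decoders agree on each of the ten table rows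
set_option maxHeartbeats 2000000 in
set_option maxRecDepth 100000 in
theorem pvTail_eq : ∀ m : Nat, m < 10 → pvTailA (m : Int) = pvTailB (m : Int) := by decide

theorem pvBody_eq (n : Nat) (h : n < 127) : pvBodyA n = pvBodyB n := by
  unfold pvBodyA pvBodyB
  rw [pvR_eq]
  have hb := pvDigit_bound n h
  cases hk : PySem.Int.ofStr? (pvRA n) with
  | none => rfl
  | some k =>
    rw [hk] at hb
    have hb' := of_decide_eq_true hb
    obtain ⟨m, rfl⟩ := Int.eq_ofNat_of_zero_le hb'.1
    exact pvTail_eq m (by exact_mod_cast hb'.2)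

theorem pvCharCodeLt (c : Char) (h : pvDomChar c = true) : c.toNat < 127 := by
  simp [pvDomChar] at h
  omega

-- ===== VERDICT (by name: the statement is the Claim_ definition above) =====
theorem gen_rsid_spec : Claim_equal_gen_rsid := by
  intro tid hdom hpre
  unfold Spec_gen_rsid gen_rsid gen_rsid_alt
  cases hl : tid.toList with
  | nil => exact absurd (by rwa [String.toList_eq_nil_iff] at hl) hpre
  | cons c cs =>
    have hd : pvDomChar c = true := by
      have := hdom
      unfold Dom_gen_rsid pvDomStr at this
      rw [hl] at this
      simp [List.all_cons] at this
      exact this.1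
    have h0 : PySem.Str.pyGet? tid 0 = some c := by
      have h1 := PySem.Str.pyGet?_natCast tid (0 : Nat)
      simp only [Nat.cast_zero, hl] at h1
      simpa using h1
    rw [h0]
    exact pvBody_eq c.toNat (pvCharCodeLt c hd)
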